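-- pv_equiv track=rewrite | github.com/brueggemann-lab/bacteriocins_IceKen_2022 | contiguity_cat/contiguity_cat.py | contig_dict
-- ===== SOURCE A (Python) =====
-- def contig_dict(coords):
--     output = {}
--     for locus in coords.keys():
--         if coords[locus]["contig"] in output.keys():
--             if locus in output[coords[locus]["contig"]]:
--                 pass
--             else:
--                 output[coords[locus]["contig"]].append(locus)
--         else:
--             output[coords[locus]["contig"]] = [locus]
--     return output
-- ===== SOURCE B (Python) =====
-- def contig_dict(coords):
--     pairs = [(v["contig"], k) for k, v in coords.items()]
--     order = list(dict.fromkeys(c for c, _ in pairs))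
--     return {c: [k for cc, k in pairs if cc == c] for c in order}
-- ===== Notes on version B (the rewrite author's own statement) =====
-- stated objective: simpler
-- what changed: Replaces the incremental dict-of-lists loop (with its membership/append branching) by a declarative two-phase grouping: extract (contig, locus) pairs, dedup the contigs in first-occurrence order, then build each bucket with a comprehension over the pairs.
import Mathlib
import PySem

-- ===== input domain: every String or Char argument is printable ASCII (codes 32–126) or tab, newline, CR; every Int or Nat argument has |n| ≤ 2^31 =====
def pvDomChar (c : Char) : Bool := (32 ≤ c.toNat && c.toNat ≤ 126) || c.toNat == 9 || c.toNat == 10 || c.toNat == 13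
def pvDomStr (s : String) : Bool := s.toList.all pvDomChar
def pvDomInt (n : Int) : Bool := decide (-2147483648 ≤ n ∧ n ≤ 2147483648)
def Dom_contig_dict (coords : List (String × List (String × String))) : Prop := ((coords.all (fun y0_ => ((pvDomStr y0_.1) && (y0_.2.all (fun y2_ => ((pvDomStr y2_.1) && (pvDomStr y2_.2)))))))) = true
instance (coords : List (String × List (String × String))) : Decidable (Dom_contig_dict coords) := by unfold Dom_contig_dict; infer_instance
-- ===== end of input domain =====

-- B groups the loci in two declarative phases (pairs, dedup'd contig order, per-contig
-- comprehension) instead of A's incremental dict-of-lists loop; same result, simpler code.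


-- ===== PORT A =====
-- coords[locus]["contig"] (Pre_ guarantees both lookups succeed, so the getD defaults are never used)
def pvContigOf (coords : List (String × List (String × String))) (locus : String) : String :=
  ((PySem.Dict.mk (((PySem.Dict.mk coords).get? locus).getD [])).get? "contig").getD ""

-- A's loop body: the if/elif branching on whether the contig is already a key / the locus
-- already in its bucket.
def pvStepA (coords : List (String × List (String × String)))
    (output : PySem.Dict String (List String)) (locus : String) :
    PySem.Dict String (List String) :=
  match output.get? (pvContigOf coords locus) with
  | some l =>
      if locus ∈ l then output
      else output.insert (pvContigOf coords locus) (l ++ [locus])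
  | none => output.insert (pvContigOf coords locus) [locus]

def contig_dict (coords : List (String × List (String × String))) : List (String × List String) :=
  ((coords.map (·.1)).foldl (pvStepA coords) PySem.Dict.empty).items

-- ===== PORT B =====
def contig_dict_alt (coords : List (String × List (String × String))) : List (String × List String) :=
  let pairs := coords.map (fun kv => ((((PySem.Dict.mk kv.2).get? "contig").getD ""), kv.1))
  let order := PySem.List.dedup (pairs.map (·.1))
  order.map (fun c => (c, (pairs.filter (fun p => p.1 == c)).map (·.2)))

-- ===== PRECONDITION & SPEC =====
-- Pre_ requires the outer and inner association lists to have distinct keys (they represent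
-- Python dicts, which cannot hold duplicate keys) and every inner dict to contain the key
-- "contig" (A raises KeyError otherwise, and so does B).
def Pre_contig_dict (coords : List (String × List (String × String))) : Prop :=
  (coords.map (·.1)).Nodup ∧
    ∀ kv ∈ coords, (kv.2.map (·.1)).Nodup ∧ (PySem.Dict.mk kv.2).contains "contig" = true
instance (coords : List (String × List (String × String))) : Decidable (Pre_contig_dict coords) := by
  unfold Pre_contig_dict; infer_instance

def pvWitness_contig_dict : (List (String × List (String × String))) :=
  [("locA", [("contig", "c1"), ("start", "3")]),
   ("locB", [("contig", "c2")]),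
   ("locC", [("contig", "c1")])]

def Spec_contig_dict (coords : List (String × List (String × String))) (out : List (String × List String)) : Prop := out = contig_dict_alt coords
instance (coords : List (String × List (String × String))) (out : List (String × List String)) : Decidable (Spec_contig_dict coords out) := by unfold Spec_contig_dict; infer_instance

-- ===== CLAIM (what is proved, stated in full; the proofs are below) =====
def Claim_equal_contig_dict : Prop := ∀ (coords : List (String × List (String × String))), Dom_contig_dict coords → Pre_contig_dict coords → Spec_contig_dict coords (contig_dict coords)

-- ===== LEMMAS AND PROOFS =====

-- When the current locus is not yet in its bucket, A's step IS a dict `modify` appending it.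
theorem pvStepA_eq_modify (coords : List (String × List (String × String)))
    (d : PySem.Dict String (List String)) (locus : String)
    (h : locus ∉ d.getD (pvContigOf coords locus) []) :
    pvStepA coords d locus =
      d.modify (pvContigOf coords locus) [] (· ++ [locus]) := by
  unfold pvStepA
  have hmod : d.modify (pvContigOf coords locus) [] (· ++ [locus]) =
      d.insert (pvContigOf coords locus) (d.getD (pvContigOf coords locus) [] ++ [locus]) := rfl
  rw [hmod]
  cases hg : d.get? (pvContigOf coords locus) with
  | none =>
      simp [PySem.Dict.getD_eq_get?_getD, hg]
  | some l =>
      have hl : d.getD (pvContigOf coords locus) [] = l := by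
        simp [PySem.Dict.getD_eq_get?_getD, hg]
      rw [hl] at h ⊢
      simp [h]

-- A's whole loop is the `modify`-append loop, provided no pending locus is already in a bucket.
theorem pvFoldA_eq_foldModify (coords : List (String × List (String × String)))
    (l : List String) (d : PySem.Dict String (List String))
    (hd : ∀ c x, x ∈ d.getD c [] → x ∉ l) (hnd : l.Nodup) :
    l.foldl (pvStepA coords) d =
      l.foldl (fun d locus => d.modify (pvContigOf coords locus) [] (· ++ [locus])) d := by
  induction l generalizing d with
  | nil => rfl
  | cons k rest ih =>
      simp only [List.foldl_cons]
      rw [pvStepA_eq_modify coords d k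
        (fun hmem => hd _ _ hmem (List.mem_cons_self))]
      exact ih _
        (by
          intro c x hx hxr
          rw [PySem.Dict.getD_modify] at hx
          split_ifs at hx with hc
          · rcases List.mem_append.mp hx with h1 | h1
            · exact hd c x (hc ▸ h1) (List.mem_cons_of_mem _ hxr)
            · exact (List.nodup_cons.mp hnd).1 ((List.mem_singleton.mp h1) ▸ hxr)
          · exact hd c x hx (List.mem_cons_of_mem _ hxr))
        (List.nodup_cons.mp hnd).2

-- Under Pre_, looking a key of coords up in coords gives back its own value.
theorem pvContigOf_mem (coords : List (String × List (String × String)))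
    (hnd : (coords.map (·.1)).Nodup) (kv : String × List (String × String)) (hkv : kv ∈ coords) :
    pvContigOf coords kv.1 = ((PySem.Dict.mk kv.2).get? "contig").getD "" := by
  unfold pvContigOf
  have : (PySem.Dict.mk coords).get? kv.1 = some kv.2 :=
    PySem.Dict.get?_of_mem_items (d := PySem.Dict.mk coords) (k := kv.1) (v := kv.2) hkv hnd
  rw [this]
  rfl

theorem contig_dict_spec_aux (coords : List (String × List (String × String)))
    (h : Pre_contig_dict coords) : contig_dict coords = contig_dict_alt coords := by
  obtain ⟨hnd, _⟩ := h
  -- the (contig, locus) pairs B builds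
  set pairs := coords.map (fun kv => ((((PySem.Dict.mk kv.2).get? "contig").getD ""), kv.1)) with hpairs
  -- A's loop, rewritten as the modify-append loop over `pairs`
  have hA : contig_dict coords =
      (pairs.foldl (fun d p => d.modify p.1 [] (· ++ [p.2])) PySem.Dict.empty).items := by
    show ((coords.map (·.1)).foldl (pvStepA coords) PySem.Dict.empty).items = _
    rw [pvFoldA_eq_foldModify coords _ _
      (by intro c x hx; simp [PySem.Dict.getD_empty] at hx) hnd]
    rw [hpairs]
    rw [List.foldl_map, List.foldl_map]
    congr 1
    apply PySem.List.foldl_congr_mem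
    intro d kv hkv
    rw [pvContigOf_mem coords hnd kv hkv]
  -- the fold's keys are the distinct contigs in first-occurrence order, its buckets the filters
  rw [hA]
  have hkeys : (pairs.foldl (fun d p => d.modify p.1 [] (· ++ [p.2])) PySem.Dict.empty).keys =
      PySem.Set.ofList (pairs.map (·.1)) := by
    rw [PySem.Dict.keys_foldl_modify_key pairs (·.1) [] (fun _ p v => v ++ [p.2]) PySem.Dict.empty]
    simp [PySem.Dict.keys_empty, PySem.Set.update_nil_left]
  have hnodupkeys : (pairs.foldl (fun d p => d.modify p.1 [] (· ++ [p.2]))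
      PySem.Dict.empty).keys.Nodup := by
    rw [hkeys]; exact PySem.Set.nodup_ofList _
  rw [PySem.Dict.items_eq_map_keys _ hnodupkeys []]
  rw [hkeys]
  show _ = (PySem.List.dedup (pairs.map (·.1))).map
      (fun c => (c, (pairs.filter (fun p => p.1 == c)).map (·.2)))
  rw [PySem.List.dedup_eq_ofList]
  apply List.map_congr_left
  intro c _
  rw [PySem.Dict.getD_foldl_modify_append]
  simp [PySem.Dict.getD_empty]

-- ===== VERDICT (by name: the statement is the Claim_ definition above) =====
theorem contig_dict_spec : Claim_equal_contig_dict := by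
  intro coords _ hpre
  exact contig_dict_spec_aux coords hpre
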